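-- pv_equiv track=rewrite | github.com/slidracoon72/leetcode | Solutions/DefuseTheBomb.py | decrypt4
-- ===== SOURCE A (Python) =====
-- from typing import List
--
-- def decrypt4(code: List[int], k: int) -> List[int]:
--     temp = code + code
--     if k == 0:
--         return [0] * len(code)
--     elif k > 0:
--         cur = 0
--         l = 0
--         for r in range(1, len(temp)):
--             cur += temp[r]
--             if l < len(code) and r - l == k:
--                 code[l] = cur
--                 cur -= temp[l + 1]
--                 l += 1
--         return code
--     else:
--         for i in range(len(code), len(temp)):
--             code[i - len(code)] = sum(temp[i + k:i])
--         return code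
-- ===== SOURCE B (Python) =====
-- from typing import List
--
-- def decrypt4(code: List[int], k: int) -> List[int]:
--     # Prefix sums over the doubled list; each answer is one subtraction.
--     n = len(code)
--     if k == 0:
--         return [0] * n
--     prefix = [0]
--     for x in code + code:
--         prefix.append(prefix[-1] + x)
--     if k > 0:
--         return [prefix[j + k + 1] - prefix[j + 1] for j in range(n)]
--     return [prefix[j + n] - prefix[j + n + k] for j in range(n)]
-- ===== Notes on version B (the rewrite author's own statement) =====
-- stated objective: alternative
-- what changed: B builds one prefix-sum table over the doubled list and returns each answer as a single subtraction, replacing A's per-element slice summation (negative k) and in-place sliding-window bookkeeping (positive k); Pre_ restricts to the problem's natural domain |k| <= len(code) (the LeetCode task guarantees |k| < n), because outside it A's partially-updated list (k > n) and empty-/wrapped-slice sums (k < -n) are artefacts of its doubling trick, where B raises IndexError resp. returns a different value.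
-- outside the precondition, e.g. on decrypt4([1, 2], 5): A returns [1, 2], B raises IndexError; on decrypt4([1, 2], -5): A returns [2, 1], B returns [0, 0]
import Mathlib
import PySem

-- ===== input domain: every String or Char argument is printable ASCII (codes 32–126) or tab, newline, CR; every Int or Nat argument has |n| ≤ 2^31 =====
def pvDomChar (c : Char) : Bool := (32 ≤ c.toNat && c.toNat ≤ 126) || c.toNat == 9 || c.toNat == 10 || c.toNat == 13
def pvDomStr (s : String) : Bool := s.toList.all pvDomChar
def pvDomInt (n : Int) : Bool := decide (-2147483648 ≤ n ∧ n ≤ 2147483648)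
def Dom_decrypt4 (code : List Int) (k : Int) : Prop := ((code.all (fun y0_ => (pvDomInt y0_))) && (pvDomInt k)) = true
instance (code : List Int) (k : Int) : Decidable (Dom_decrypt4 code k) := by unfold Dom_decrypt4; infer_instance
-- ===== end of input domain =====

-- B builds one prefix-sum table over the doubled list and returns each answer as a single
-- subtraction, replacing A's per-element slice summation (negative k) and in-place
-- sliding-window bookkeeping (positive k).  Python A mutates `code` in place; the
-- equivalence proved here is about the RETURN value only (B builds a fresh list).

-- ===== PORT A =====
def decrypt4 (code : List Int) (k : Int) : List Int :=
  let temp := code ++ code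
  if k == 0 then
    List.replicate code.length 0
  else if k > 0 then
    let st := (PySem.List.pyRange 1 (temp.length : Int) 1).foldl
      (fun (st : Int × Int × List Int) r =>
        let cur := st.1 + PySem.List.pyGetD temp r 0
        let l := st.2.1
        let c := st.2.2
        if l < (c.length : Int) && r - l == k then
          (cur - PySem.List.pyGetD temp (l + 1) 0, l + 1, PySem.List.pySetD c l cur)
        else (cur, l, c))
      (0, 0, code)
    st.2.2
  else
    (PySem.List.pyRange (code.length : Int) (temp.length : Int) 1).foldl
      (fun c i => PySem.List.pySetD c (i - (code.length : Int))
        ((PySem.List.slice temp (some (i + k)) (some i)).sum))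
      code

-- ===== PORT B =====
-- (Indexing `prefix[...]` is ported with pyGetD; under Pre_decrypt4 every index is in range,
--  where pyGetD is exact.)
def decrypt4_alt (code : List Int) (k : Int) : List Int :=
  let n := code.length
  if k == 0 then
    List.replicate n 0
  else
    let pfx := (code ++ code).foldl (fun p x => p ++ [PySem.List.pyGetD p (-1) 0 + x]) [0]
    if k > 0 then
      (PySem.List.pyRange 0 (n : Int) 1).map
        (fun j => PySem.List.pyGetD pfx (j + k + 1) 0 - PySem.List.pyGetD pfx (j + 1) 0)
    else
      (PySem.List.pyRange 0 (n : Int) 1).map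
        (fun j => PySem.List.pyGetD pfx (j + (n : Int)) 0
                  - PySem.List.pyGetD pfx (j + (n : Int) + k) 0)

-- ===== PRECONDITION & SPEC =====
-- Pre_ restricts to the problem's natural domain |k| ≤ len(code) (the original LeetCode task
-- guarantees |k| < n): outside it A's partially-updated list (k > n) and empty-/wrapped-slice
-- sums (k < -n) are artefacts of its list-doubling trick, where B raises IndexError
-- (k > n) resp. returns a different value (k < -n).
def Pre_decrypt4 (code : List Int) (k : Int) : Prop :=
  code = [] ∨ k = 0 ∨ (-(code.length : Int) ≤ k ∧ k ≤ (code.length : Int))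
instance (code : List Int) (k : Int) : Decidable (Pre_decrypt4 code k) := by
  unfold Pre_decrypt4; infer_instance
def pvWitness_decrypt4 : List Int × Int := ([1, 2, 3], 2)

def Spec_decrypt4 (code : List Int) (k : Int) (out : List Int) : Prop := out = decrypt4_alt code k
instance (code : List Int) (k : Int) (out : List Int) : Decidable (Spec_decrypt4 code k out) := by unfold Spec_decrypt4; infer_instance

-- ===== CLAIM (what is proved, stated in full; the proofs are below) =====
def Claim_equal_decrypt4 : Prop := ∀ (code : List Int) (k : Int), Dom_decrypt4 code k → Pre_decrypt4 code k → Spec_decrypt4 code k (decrypt4 code k)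

-- ===== LEMMAS AND PROOFS =====

def pvS (d : List Int) (j : Nat) : Int := (d.take j).sum

lemma pvPrefix_gen (d : List Int) : ∀ (a : List Int) (s : Int),
    d.foldl (fun p x => p ++ [PySem.List.pyGetD p (-1) 0 + x]) (a ++ [s])
      = (a ++ [s]) ++ (List.range d.length).map (fun j => s + (d.take (j + 1)).sum) := by
  induction d with
  | nil => simp
  | cons x d ih =>
    intro a s
    rw [List.foldl_cons, PySem.List.pyGetD_neg_one_append_singleton]
    rw [ih (a ++ [s]) (s + x)]
    rw [List.length_cons, List.range_succ_eq_map, List.map_cons, List.map_map,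
      List.append_assoc]
    congr 1
    rw [List.singleton_append]
    congr 1
    · simp
    · apply List.map_congr_left; intro j _; simp [Function.comp]; ring

lemma pvPrefix_spec (d : List Int) :
    d.foldl (fun p x => p ++ [PySem.List.pyGetD p (-1) 0 + x]) [0]
      = (List.range (d.length + 1)).map (fun j => pvS d j) := by
  rw [show ([0] : List Int) = [] ++ [0] by simp, pvPrefix_gen,
    List.range_succ_eq_map, List.map_cons, List.map_map]
  simp [pvS]

lemma pvPrefix_getD (d : List Int) (i : Int) (h0 : 0 ≤ i) (h1 : i ≤ (d.length : Int)) :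
    PySem.List.pyGetD
      (d.foldl (fun p x => p ++ [PySem.List.pyGetD p (-1) 0 + x]) [0]) i 0
      = pvS d i.toNat := by
  rw [pvPrefix_spec, PySem.List.pyGetD_eq_getElem _ _ h0 (by simp; omega)]
  rw [List.getElem_map, List.getElem_range]

lemma pvS_succ (d : List Int) (i : Nat) (h : i < d.length) :
    pvS d (i + 1) = pvS d i + d.getD i 0 := by
  simp only [pvS, List.take_add_one, List.sum_append]
  simp [List.getElem?_eq_getElem h, List.getD_eq_getElem?_getD]

lemma pvSum_take_drop (d : List Int) (ca t : Nat) :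
    ((d.drop ca).take t).sum = pvS d (ca + t) - pvS d ca := by
  have h : d.take (ca + t) = d.take ca ++ (d.drop ca).take t := by
    rw [List.take_add]
  simp [pvS, h]

lemma pvSum_slice (d : List Int) (a b : Int) (hb0 : 0 ≤ b) (hb : b ≤ (d.length : Int)) :
    (PySem.List.slice d (some a) (some b)).sum
      = pvS d b.toNat - pvS d (min (PySem.List.clampIdx d.length a) b.toNat) := by
  simp only [PySem.List.slice]
  rw [pvSum_take_drop]
  have hcb : PySem.List.clampIdx d.length b = b.toNat := by
    unfold PySem.List.clampIdx; split
    · omega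
    · omega
  rw [hcb]
  have h2 : PySem.List.clampIdx d.length a + (b.toNat - PySem.List.clampIdx d.length a)
      = max (PySem.List.clampIdx d.length a) b.toNat := by omega
  rw [h2]
  by_cases hle : PySem.List.clampIdx d.length a ≤ b.toNat
  · rw [max_eq_right hle, min_eq_left hle]
  · rw [max_eq_left (by omega), min_eq_right (by omega)]
    ring

lemma pvSet_map_range {β : Type} (f : Nat → β) (n m : Nat) (v : β) :
    ((List.range n).map f).set m v
      = (List.range n).map (fun j => if j = m then v else f j) := by
  apply List.ext_getElem
  · simp
  · intro i h1 h2
    simp only [List.getElem_set, List.getElem_map, List.getElem_range]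
    simp at h1
    by_cases hm : i = m
    · simp [hm]
    · simp [hm, Ne.symm hm]

def pvFpos (code : List Int) (K : Nat) (j : Nat) : Int :=
  if j + K + 1 ≤ 2 * code.length then
    pvS (code ++ code) (j + K + 1) - pvS (code ++ code) (j + 1)
  else code.getD j 0

def pvFneg (code : List Int) (k : Int) (j : Nat) : Int :=
  let n := code.length
  let e : Int := (j : Int) + n
  let s0 := e + k
  let s1 := if s0 < 0 then (if s0 + 2 * (n : Int) < 0 then 0 else s0 + 2 * (n : Int)) else s0
  pvS (code ++ code) e.toNat - pvS (code ++ code) (min s1 e).toNat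

lemma altPos (code : List Int) (k : Int) (hk : 0 < k) (hkn : k ≤ (code.length : Int)) :
    decrypt4_alt code k = (List.range code.length).map (pvFpos code k.toNat) := by
  unfold decrypt4_alt
  rw [if_neg (by simp; omega), if_pos (by simpa using hk)]
  rw [PySem.List.pyRange_zero_natCast, List.map_map]
  apply List.map_congr_left
  intro j hj
  rw [List.mem_range] at hj
  set n := code.length with hn
  simp only [Function.comp]
  rw [pvPrefix_getD _ _ (by omega) (by simp; omega)]
  rw [pvPrefix_getD _ _ (by omega) (by simp; omega)]
  rw [pvFpos, if_pos (by omega)]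
  congr 1 <;> congr 1 <;> omega

lemma altNeg (code : List Int) (k : Int) (hk : k < 0) (hkn : -(code.length : Int) ≤ k) :
    decrypt4_alt code k = (List.range code.length).map (pvFneg code k) := by
  unfold decrypt4_alt
  rw [if_neg (by simp; omega), if_neg (by simp; omega)]
  rw [PySem.List.pyRange_zero_natCast, List.map_map]
  apply List.map_congr_left
  intro j hj
  rw [List.mem_range] at hj
  set n := code.length with hn
  simp only [Function.comp, pvFneg]
  rw [pvPrefix_getD _ _ (by omega) (by simp; omega)]
  rw [pvPrefix_getD _ _ (by omega) (by simp; omega)]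
  rw [if_neg (by omega)]
  rw [min_eq_left (by omega)]

lemma negInv (code : List Int) (k : Int) (hk : k < 0) :
    ∀ m : Nat, m ≤ code.length →
    (PySem.List.pyRange (code.length : Int) ((code.length : Int) + m) 1).foldl
      (fun c i => PySem.List.pySetD c (i - (code.length : Int))
        ((PySem.List.slice (code ++ code) (some (i + k)) (some i)).sum))
      code
    = (List.range code.length).map
        (fun j => if j < m then pvFneg code k j else code.getD j 0) := by
  intro m
  induction m with
  | zero =>
    intro _
    rw [PySem.List.pyRange_one_eq_nil (by omega), List.foldl_nil]
    apply List.ext_getElem (by simp)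
    intro i h1 h2
    simp [List.getD_eq_getElem?_getD, List.getElem?_eq_getElem h1]
  | succ m ih =>
    intro hm
    rw [show ((code.length : Int) + (m + 1 : Nat)) = ((code.length : Int) + m) + 1 by push_cast; ring]
    rw [PySem.List.pyRange_one_succ_right (by omega), List.foldl_append, List.foldl_cons,
      List.foldl_nil, ih (by omega)]
    set n := code.length with hn
    rw [show ((n : Int) + m - n) = ((m : Nat) : Int) by ring]
    rw [PySem.List.pySetD_natCast]
    rw [pvSum_slice _ _ _ (by omega) (by simp; omega)]
    rw [pvSet_map_range]
    apply List.map_congr_left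
    intro j hj
    rw [List.mem_range] at hj
    by_cases hjm : j = m
    · subst hjm
      rw [if_pos rfl, if_pos (by omega)]
      simp only [pvFneg]
      have he : ((j:Int) + n).toNat = n + j := by omega
      congr 1
      · congr 1; omega
      · congr 1
        unfold PySem.List.clampIdx
        have hlen : (code ++ code).length = 2 * n := by simp; omega
        rw [hlen]
        split
        · split
          · omega
          · omega
        · omega
    · rw [if_neg hjm]
      by_cases hlt : j < m
      · rw [if_pos hlt, if_pos (by omega)]
      · rw [if_neg hlt, if_neg (by omega)]

def pvL (n K m : Nat) : Nat := min n (m + 1 - K)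

lemma posInv (code : List Int) (k : Int) (hk : 0 < k) :
    ∀ m : Nat, m < 2 * code.length →
    (PySem.List.pyRange 1 (1 + (m : Int)) 1).foldl
      (fun (st : Int × Int × List Int) r =>
        if st.2.1 < (st.2.2.length : Int) && r - st.2.1 == k then
          (st.1 + PySem.List.pyGetD (code ++ code) r 0
             - PySem.List.pyGetD (code ++ code) (st.2.1 + 1) 0,
           st.2.1 + 1,
           PySem.List.pySetD st.2.2 st.2.1 (st.1 + PySem.List.pyGetD (code ++ code) r 0))
        else (st.1 + PySem.List.pyGetD (code ++ code) r 0, st.2.1, st.2.2))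
      (0, 0, code)
    = (pvS (code ++ code) (m + 1) - pvS (code ++ code) (pvL code.length k.toNat m + 1),
       ((pvL code.length k.toNat m : Nat) : Int),
       (List.range code.length).map
         (fun j => if j < pvL code.length k.toNat m then pvFpos code k.toNat j
                   else code.getD j 0)) := by
  have hK : ((k.toNat : Int)) = k := Int.toNat_of_nonneg hk.le
  set n := code.length with hn
  set K := k.toNat with hKdef
  have hK1 : 1 ≤ K := by omega
  intro m
  induction m with
  | zero =>
    intro _
    rw [show ((1:Int) + (0:Nat)) = 1 by norm_num, PySem.List.pyRange_one_eq_nil (by omega),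
      List.foldl_nil]
    have hL0 : pvL n K 0 = 0 := by unfold pvL; omega
    rw [hL0]
    refine Prod.ext (by simp) (Prod.ext (by simp) ?_)
    show code = _
    apply List.ext_getElem (by simp [hn])
    intro i h1 h2
    simp [List.getD_eq_getElem?_getD, List.getElem?_eq_getElem h1]
  | succ m ih =>
    intro hm
    rw [show ((1:Int) + ((m+1 : Nat) : Int)) = (1 + (m : Int)) + 1 by push_cast; ring]
    rw [PySem.List.pyRange_one_succ_right (by omega), List.foldl_append, List.foldl_cons,
      List.foldl_nil, ih (by omega)]
    simp only [Bool.and_eq_true, decide_eq_true_eq, beq_iff_eq, List.length_map,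
      List.length_range]
    have hgetm : PySem.List.pyGetD (code ++ code) (1 + (m : Int)) 0 = (code ++ code).getD (m+1) 0 := by
      rw [show (1 + (m : Int)) = ((m + 1 : Nat) : Int) by push_cast; ring, PySem.List.pyGetD_natCast]
    have hlen2 : (code ++ code).length = 2 * n := by simp; omega
    have hSm : pvS (code ++ code) (m + 2) = pvS (code ++ code) (m + 1) + (code ++ code).getD (m+1) 0 :=
      pvS_succ _ _ (by omega)
    by_cases hcond : ((pvL n K m : Int)) < (n : Int) ∧ (1 + (m : Int)) - (pvL n K m : Int) = k
    · rw [if_pos hcond]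
      obtain ⟨hc1, hc2⟩ := hcond
      have hLm : pvL n K m = m + 1 - K ∧ m + 1 - K < n ∧ K ≤ m + 1 := by
        unfold pvL at *; omega
      have hL1 : pvL n K (m+1) = pvL n K m + 1 := by unfold pvL at *; omega
      have hcur : (pvS (code ++ code) (m + 1) - pvS (code ++ code) (pvL n K m + 1))
          + PySem.List.pyGetD (code ++ code) (1 + (m : Int)) 0
          = pvS (code ++ code) (m + 2) - pvS (code ++ code) (pvL n K m + 1) := by
        rw [hgetm, hSm]; ring
      have hgetl : PySem.List.pyGetD (code ++ code) ((pvL n K m : Int) + 1) 0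
          = (code ++ code).getD (pvL n K m + 1) 0 := by
        rw [show ((pvL n K m : Int) + 1) = ((pvL n K m + 1 : Nat) : Int) by push_cast; ring,
          PySem.List.pyGetD_natCast]
      have hSl : pvS (code ++ code) (pvL n K m + 2)
          = pvS (code ++ code) (pvL n K m + 1) + (code ++ code).getD (pvL n K m + 1) 0 :=
        pvS_succ _ _ (by omega)
      refine Prod.ext ?_ (Prod.ext ?_ ?_)
      · show _ = pvS (code ++ code) (m + 1 + 1) - pvS (code ++ code) (pvL n K (m+1) + 1)
        simp only [hcur, hgetl, hL1]
        rw [hSl]; ring_nf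
      · show ((pvL n K m : Int) + 1) = _
        simp only [hL1]; push_cast; ring
      · show PySem.List.pySetD _ ((pvL n K m : Int)) _ = _
        rw [PySem.List.pySetD_natCast, pvSet_map_range]
        apply List.map_congr_left
        intro j hj
        rw [List.mem_range] at hj
        by_cases hje : j = pvL n K m
        · subst hje
          rw [if_pos rfl, if_pos (by omega)]
          rw [hcur]
          rw [pvFpos, if_pos (by omega)]
          congr 2
          omega
        · rw [if_neg hje]
          by_cases hlt : j < pvL n K m
          · rw [if_pos hlt, if_pos (by omega)]
          · rw [if_neg hlt, if_neg (by omega)]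
    · rw [if_neg hcond]
      have hL1 : pvL n K (m+1) = pvL n K m := by
        unfold pvL at *
        by_cases h1 : m + 1 - K < n
        · omega
        · omega
      refine Prod.ext ?_ (Prod.ext (by rw [hL1]) (by rw [hL1]))
      show _ = pvS (code ++ code) (m + 1 + 1) - pvS (code ++ code) (pvL n K (m+1) + 1)
      rw [hL1, hgetm, show m + 1 + 1 = m + 2 from rfl, hSm]
      ring

-- ===== VERDICT (by name: the statement is the Claim_ definition above) =====
theorem decrypt4_spec : Claim_equal_decrypt4 := by
  intro code k _ hpre
  show decrypt4 code k = decrypt4_alt code k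
  by_cases hnil : code = []
  · subst hnil
    unfold decrypt4 decrypt4_alt
    rcases lt_trichotomy k 0 with hk | hk | hk
    · rw [if_neg (by simp; omega), if_neg (by simp; omega), if_neg (by simp; omega),
        if_neg (by simp; omega)]
      simp [PySem.List.pyRange_one_eq_nil]
    · subst hk; simp
    · rw [if_neg (by simp; omega), if_pos (by simpa using hk), if_neg (by simp; omega),
        if_pos (by simpa using hk)]
      simp [PySem.List.pyRange_one_eq_nil]
  · have hkb : k = 0 ∨ (-(code.length : Int) ≤ k ∧ k ≤ (code.length : Int)) := by
      rcases hpre with h | h | h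
      · exact absurd h hnil
      · exact Or.inl h
      · exact Or.inr h
    rcases lt_trichotomy k 0 with hk | hk | hk
    · -- negative
      have hkn : -(code.length : Int) ≤ k := by rcases hkb with h | h <;> omega
      rw [altNeg code k hk hkn]
      unfold decrypt4
      simp only []
      rw [if_neg (by simp; omega), if_neg (by simp; omega)]
      rw [show (((code ++ code).length : Nat) : Int) = ((code.length : Int) + ((code.length : Nat) : Int)) by push_cast [List.length_append]; ring]
      rw [negInv code k hk code.length le_rfl]
      apply List.map_congr_left
      intro j hj
      rw [List.mem_range] at hj
      rw [if_pos hj]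
    · subst hk
      unfold decrypt4 decrypt4_alt
      simp
    · -- positive
      have hkn : k ≤ (code.length : Int) := by rcases hkb with h | h <;> omega
      rw [altPos code k hk hkn]
      unfold decrypt4
      simp only []
      rw [if_neg (by simp; omega), if_pos (by simpa using hk)]
      have hn : code.length ≠ 0 := by
        intro h; exact hnil (List.length_eq_zero_iff.mp h)
      rw [show (((code ++ code).length : Nat) : Int) = 1 + ((2 * code.length - 1 : Nat) : Int) by push_cast [List.length_append]; omega]
      rw [posInv code k hk (2 * code.length - 1) (by omega)]
      show (List.range code.length).map _ = _
      apply List.map_congr_left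
      intro j hj
      rw [List.mem_range] at hj
      rw [if_pos (by unfold pvL; omega)]
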